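-- pv_equiv track=rewrite | github.com/Gyzmoooo/TKDTS | src/python/taekwondo-ts.py | generate_column_names
-- ===== SOURCE A (Python) =====
-- NUM_BOARDS = 4
--
-- SENSORS = ['A', 'G']
--
-- AXES = ['x', 'y', 'z']
--
-- def generate_column_names(num_timesteps):
--     column_names = []
--     for i in range(num_timesteps):
--         suffix = f"_{i + 1}"
--         for sensor_type in SENSORS:
--             for board_id in range(1, NUM_BOARDS + 1):
--                 for axis in AXES:
--                     col_name = f"{sensor_type}{board_id}{axis}{suffix}"
--                     column_names.append(col_name)
--     return column_names
-- ===== SOURCE B (Python) =====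
-- NUM_BOARDS = 4
--
-- SENSORS = ['A', 'G']
--
-- AXES = ['x', 'y', 'z']
--
-- def generate_column_names(num_timesteps):
--     column_names = []
--     for k in range(24 * num_timesteps):
--         i, r = divmod(k, 24)
--         s, r2 = divmod(r, 12)
--         b, a = divmod(r2, 3)
--         sensor = 'A' if s == 0 else 'G'
--         axis = 'x' if a == 0 else ('y' if a == 1 else 'z')
--         column_names.append(f"{sensor}{b + 1}{axis}_{i + 1}")
--     return column_names
-- ===== Notes on version B (the rewrite author's own statement) =====
-- stated objective: alternative
-- what changed: B replaces A's four nested loops by a single flat loop over all column indices (one per output name), decoding each index arithmetically with divmod into its timestep, sensor, board and axis.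
import Mathlib
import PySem

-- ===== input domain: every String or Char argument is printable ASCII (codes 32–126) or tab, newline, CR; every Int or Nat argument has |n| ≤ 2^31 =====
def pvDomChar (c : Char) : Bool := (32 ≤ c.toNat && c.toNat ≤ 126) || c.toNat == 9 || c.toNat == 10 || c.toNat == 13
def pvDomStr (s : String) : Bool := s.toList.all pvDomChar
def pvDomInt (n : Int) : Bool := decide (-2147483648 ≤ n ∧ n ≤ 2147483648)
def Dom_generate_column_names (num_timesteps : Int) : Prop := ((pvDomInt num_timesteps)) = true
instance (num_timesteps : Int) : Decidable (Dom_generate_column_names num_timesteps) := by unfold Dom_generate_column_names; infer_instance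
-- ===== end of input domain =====

-- B replaces A's four nested loops by one flat loop over all column indices that decodes
-- each index arithmetically (divmod) into timestep/sensor/board/axis (objective: alternative).

-- ===== PORT A =====
def generate_column_names (num_timesteps : Int) : List String :=
  (PySem.List.pyRange 0 num_timesteps 1).foldl (fun acc i =>
    let suffix := "_" ++ PySem.Int.toStr (i + 1)
    ["A", "G"].foldl (fun acc sensor_type =>
      (PySem.List.pyRange 1 (4 + 1) 1).foldl (fun acc board_id =>
        ["x", "y", "z"].foldl (fun acc axis =>
          acc ++ [sensor_type ++ PySem.Int.toStr board_id ++ axis ++ suffix]) acc) acc) acc) []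

-- ===== PORT B =====
def generate_column_names_alt (num_timesteps : Int) : List String :=
  (PySem.List.pyRange 0 (24 * num_timesteps) 1).foldl (fun column_names k =>
    let i := PySem.Int.floordiv k 24
    let r := PySem.Int.mod k 24
    let s := PySem.Int.floordiv r 12
    let r2 := PySem.Int.mod r 12
    let b := PySem.Int.floordiv r2 3
    let a := PySem.Int.mod r2 3
    let sensor := if s = 0 then "A" else "G"
    let axis := if a = 0 then "x" else if a = 1 then "y" else "z"
    column_names ++ [sensor ++ PySem.Int.toStr (b + 1) ++ axis ++ "_" ++ PySem.Int.toStr (i + 1)]) []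

-- ===== PRECONDITION & SPEC =====
def Spec_generate_column_names (num_timesteps : Int) (out : List String) : Prop := out = generate_column_names_alt num_timesteps
instance (num_timesteps : Int) (out : List String) : Decidable (Spec_generate_column_names num_timesteps out) := by unfold Spec_generate_column_names; infer_instance

-- ===== CLAIM (what is proved, stated in full; the proofs are below) =====
def Claim_equal_generate_column_names : Prop := ∀ (num_timesteps : Int), Dom_generate_column_names num_timesteps → Spec_generate_column_names num_timesteps (generate_column_names num_timesteps)

-- ===== LEMMAS AND PROOFS =====

-- B's per-index decode function (the body of B's flat loop)
def gB (k : Int) : String :=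
  (if PySem.Int.floordiv (PySem.Int.mod k 24) 12 = 0 then "A" else "G") ++
    PySem.Int.toStr (PySem.Int.floordiv (PySem.Int.mod (PySem.Int.mod k 24) 12) 3 + 1) ++
    (if PySem.Int.mod (PySem.Int.mod (PySem.Int.mod k 24) 12) 3 = 0 then "x"
     else if PySem.Int.mod (PySem.Int.mod (PySem.Int.mod k 24) 12) 3 = 1 then "y" else "z") ++
    "_" ++ PySem.Int.toStr (PySem.Int.floordiv k 24 + 1)

-- A's per-timestep block of 24 names
def blockA (i : Int) : List String :=
  ["A", "G"].flatMap fun s =>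
    (PySem.List.pyRange 1 (4 + 1) 1).flatMap fun b =>
      ["x", "y", "z"].map fun a => s ++ PySem.Int.toStr b ++ a ++ ("_" ++ PySem.Int.toStr (i + 1))

theorem fdiv_24 (m j : Int) (h0 : 0 ≤ j) (h1 : j < 24) :
    PySem.Int.floordiv (24 * m + j) 24 = m := by
  rw [PySem.Int.floordiv_eq_ediv_of_pos (by norm_num)]; omega

theorem mod_24 (m j : Int) (h0 : 0 ≤ j) (h1 : j < 24) :
    PySem.Int.mod (24 * m + j) 24 = j := by
  rw [PySem.Int.mod_eq_emod_of_pos (by norm_num)]; omega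

theorem gcn_body (i : Int) (acc : List String) :
    ["A", "G"].foldl (fun acc sensor_type =>
      (PySem.List.pyRange 1 (4 + 1) 1).foldl (fun acc board_id =>
        ["x", "y", "z"].foldl (fun acc axis =>
          acc ++ [sensor_type ++ PySem.Int.toStr board_id ++ axis ++ ("_" ++ PySem.Int.toStr (i + 1))]) acc) acc) acc
    = acc ++ blockA i := by
  have h : PySem.List.pyRange 1 (4 + 1) 1 = [1, 2, 3, 4] := by decide
  simp only [h, blockA]
  simp [List.foldl]

theorem A_as_flatMap (n : Int) :
    generate_column_names n = (PySem.List.pyRange 0 n 1).flatMap blockA := by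
  unfold generate_column_names
  have hfun : (fun (acc : List String) (i : Int) =>
      let suffix := "_" ++ PySem.Int.toStr (i + 1)
      ["A", "G"].foldl (fun acc sensor_type =>
        (PySem.List.pyRange 1 (4 + 1) 1).foldl (fun acc board_id =>
          ["x", "y", "z"].foldl (fun acc axis =>
            acc ++ [sensor_type ++ PySem.Int.toStr board_id ++ axis ++ suffix]) acc) acc) acc)
      = fun (acc : List String) (i : Int) => acc ++ blockA i := by
    funext acc i; exact gcn_body i acc
  rw [hfun, PySem.List.foldl_append_eq_flatMap, List.nil_append]

theorem B_as_map (n : Int) :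
    generate_column_names_alt n = (PySem.List.pyRange 0 (24 * n) 1).map gB := by
  unfold generate_column_names_alt
  have hfun : (fun (column_names : List String) (k : Int) =>
      let i := PySem.Int.floordiv k 24
      let r := PySem.Int.mod k 24
      let s := PySem.Int.floordiv r 12
      let r2 := PySem.Int.mod r 12
      let b := PySem.Int.floordiv r2 3
      let a := PySem.Int.mod r2 3
      let sensor := if s = 0 then "A" else "G"
      let axis := if a = 0 then "x" else if a = 1 then "y" else "z"
      column_names ++ [sensor ++ PySem.Int.toStr (b + 1) ++ axis ++ "_" ++ PySem.Int.toStr (i + 1)])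
      = fun (column_names : List String) (k : Int) => column_names ++ [gB k] := by
    funext acc k; simp only [gB]
  rw [hfun, PySem.List.foldl_append_singleton_eq_map, List.nil_append]

theorem gB_elem (m j : Int) (h0 : 0 ≤ j) (h1 : j < 24) :
    gB (24 * m + j) =
      (if PySem.Int.floordiv j 12 = 0 then "A" else "G") ++
        PySem.Int.toStr (PySem.Int.floordiv (PySem.Int.mod j 12) 3 + 1) ++
        (if PySem.Int.mod (PySem.Int.mod j 12) 3 = 0 then "x"
         else if PySem.Int.mod (PySem.Int.mod j 12) 3 = 1 then "y" else "z") ++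
        "_" ++ PySem.Int.toStr (m + 1) := by
  simp only [gB, fdiv_24 m j h0 h1, mod_24 m j h0 h1]

theorem gB0 (m : Int) : gB (24 * m + 0) = "A" ++ PySem.Int.toStr 1 ++ "x" ++ "_" ++ PySem.Int.toStr (m + 1) := by
  rw [gB_elem m 0 (by norm_num) (by norm_num)]
  norm_num [show PySem.Int.floordiv 0 12 = 0 from by decide, show PySem.Int.mod 0 12 = 0 from by decide,
    show PySem.Int.floordiv 0 3 = 0 from by decide, show PySem.Int.mod 0 3 = 0 from by decide]

theorem gB1 (m : Int) : gB (24 * m + 1) = "A" ++ PySem.Int.toStr 1 ++ "y" ++ "_" ++ PySem.Int.toStr (m + 1) := by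
  rw [gB_elem m 1 (by norm_num) (by norm_num)]
  norm_num [show PySem.Int.floordiv 1 12 = 0 from by decide, show PySem.Int.mod 1 12 = 1 from by decide,
    show PySem.Int.floordiv 1 3 = 0 from by decide, show PySem.Int.mod 1 3 = 1 from by decide]

theorem gB2 (m : Int) : gB (24 * m + 2) = "A" ++ PySem.Int.toStr 1 ++ "z" ++ "_" ++ PySem.Int.toStr (m + 1) := by
  rw [gB_elem m 2 (by norm_num) (by norm_num)]
  norm_num [show PySem.Int.floordiv 2 12 = 0 from by decide, show PySem.Int.mod 2 12 = 2 from by decide,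
    show PySem.Int.floordiv 2 3 = 0 from by decide, show PySem.Int.mod 2 3 = 2 from by decide]

theorem gB3 (m : Int) : gB (24 * m + 3) = "A" ++ PySem.Int.toStr 2 ++ "x" ++ "_" ++ PySem.Int.toStr (m + 1) := by
  rw [gB_elem m 3 (by norm_num) (by norm_num)]
  norm_num [show PySem.Int.floordiv 3 12 = 0 from by decide, show PySem.Int.mod 3 12 = 3 from by decide,
    show PySem.Int.floordiv 3 3 = 1 from by decide, show PySem.Int.mod 3 3 = 0 from by decide]

theorem gB4 (m : Int) : gB (24 * m + 4) = "A" ++ PySem.Int.toStr 2 ++ "y" ++ "_" ++ PySem.Int.toStr (m + 1) := by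
  rw [gB_elem m 4 (by norm_num) (by norm_num)]
  norm_num [show PySem.Int.floordiv 4 12 = 0 from by decide, show PySem.Int.mod 4 12 = 4 from by decide,
    show PySem.Int.floordiv 4 3 = 1 from by decide, show PySem.Int.mod 4 3 = 1 from by decide]

theorem gB5 (m : Int) : gB (24 * m + 5) = "A" ++ PySem.Int.toStr 2 ++ "z" ++ "_" ++ PySem.Int.toStr (m + 1) := by
  rw [gB_elem m 5 (by norm_num) (by norm_num)]
  norm_num [show PySem.Int.floordiv 5 12 = 0 from by decide, show PySem.Int.mod 5 12 = 5 from by decide,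
    show PySem.Int.floordiv 5 3 = 1 from by decide, show PySem.Int.mod 5 3 = 2 from by decide]

theorem gB6 (m : Int) : gB (24 * m + 6) = "A" ++ PySem.Int.toStr 3 ++ "x" ++ "_" ++ PySem.Int.toStr (m + 1) := by
  rw [gB_elem m 6 (by norm_num) (by norm_num)]
  norm_num [show PySem.Int.floordiv 6 12 = 0 from by decide, show PySem.Int.mod 6 12 = 6 from by decide,
    show PySem.Int.floordiv 6 3 = 2 from by decide, show PySem.Int.mod 6 3 = 0 from by decide]

theorem gB7 (m : Int) : gB (24 * m + 7) = "A" ++ PySem.Int.toStr 3 ++ "y" ++ "_" ++ PySem.Int.toStr (m + 1) := by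
  rw [gB_elem m 7 (by norm_num) (by norm_num)]
  norm_num [show PySem.Int.floordiv 7 12 = 0 from by decide, show PySem.Int.mod 7 12 = 7 from by decide,
    show PySem.Int.floordiv 7 3 = 2 from by decide, show PySem.Int.mod 7 3 = 1 from by decide]

theorem gB8 (m : Int) : gB (24 * m + 8) = "A" ++ PySem.Int.toStr 3 ++ "z" ++ "_" ++ PySem.Int.toStr (m + 1) := by
  rw [gB_elem m 8 (by norm_num) (by norm_num)]
  norm_num [show PySem.Int.floordiv 8 12 = 0 from by decide, show PySem.Int.mod 8 12 = 8 from by decide,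
    show PySem.Int.floordiv 8 3 = 2 from by decide, show PySem.Int.mod 8 3 = 2 from by decide]

theorem gB9 (m : Int) : gB (24 * m + 9) = "A" ++ PySem.Int.toStr 4 ++ "x" ++ "_" ++ PySem.Int.toStr (m + 1) := by
  rw [gB_elem m 9 (by norm_num) (by norm_num)]
  norm_num [show PySem.Int.floordiv 9 12 = 0 from by decide, show PySem.Int.mod 9 12 = 9 from by decide,
    show PySem.Int.floordiv 9 3 = 3 from by decide, show PySem.Int.mod 9 3 = 0 from by decide]

theorem gB10 (m : Int) : gB (24 * m + 10) = "A" ++ PySem.Int.toStr 4 ++ "y" ++ "_" ++ PySem.Int.toStr (m + 1) := by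
  rw [gB_elem m 10 (by norm_num) (by norm_num)]
  norm_num [show PySem.Int.floordiv 10 12 = 0 from by decide, show PySem.Int.mod 10 12 = 10 from by decide,
    show PySem.Int.floordiv 10 3 = 3 from by decide, show PySem.Int.mod 10 3 = 1 from by decide]

theorem gB11 (m : Int) : gB (24 * m + 11) = "A" ++ PySem.Int.toStr 4 ++ "z" ++ "_" ++ PySem.Int.toStr (m + 1) := by
  rw [gB_elem m 11 (by norm_num) (by norm_num)]
  norm_num [show PySem.Int.floordiv 11 12 = 0 from by decide, show PySem.Int.mod 11 12 = 11 from by decide,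
    show PySem.Int.floordiv 11 3 = 3 from by decide, show PySem.Int.mod 11 3 = 2 from by decide]

theorem gB12 (m : Int) : gB (24 * m + 12) = "G" ++ PySem.Int.toStr 1 ++ "x" ++ "_" ++ PySem.Int.toStr (m + 1) := by
  rw [gB_elem m 12 (by norm_num) (by norm_num)]
  norm_num [show PySem.Int.floordiv 12 12 = 1 from by decide, show PySem.Int.mod 12 12 = 0 from by decide,
    show PySem.Int.floordiv 0 3 = 0 from by decide, show PySem.Int.mod 0 3 = 0 from by decide]

theorem gB13 (m : Int) : gB (24 * m + 13) = "G" ++ PySem.Int.toStr 1 ++ "y" ++ "_" ++ PySem.Int.toStr (m + 1) := by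
  rw [gB_elem m 13 (by norm_num) (by norm_num)]
  norm_num [show PySem.Int.floordiv 13 12 = 1 from by decide, show PySem.Int.mod 13 12 = 1 from by decide,
    show PySem.Int.floordiv 1 3 = 0 from by decide, show PySem.Int.mod 1 3 = 1 from by decide]

theorem gB14 (m : Int) : gB (24 * m + 14) = "G" ++ PySem.Int.toStr 1 ++ "z" ++ "_" ++ PySem.Int.toStr (m + 1) := by
  rw [gB_elem m 14 (by norm_num) (by norm_num)]
  norm_num [show PySem.Int.floordiv 14 12 = 1 from by decide, show PySem.Int.mod 14 12 = 2 from by decide,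
    show PySem.Int.floordiv 2 3 = 0 from by decide, show PySem.Int.mod 2 3 = 2 from by decide]

theorem gB15 (m : Int) : gB (24 * m + 15) = "G" ++ PySem.Int.toStr 2 ++ "x" ++ "_" ++ PySem.Int.toStr (m + 1) := by
  rw [gB_elem m 15 (by norm_num) (by norm_num)]
  norm_num [show PySem.Int.floordiv 15 12 = 1 from by decide, show PySem.Int.mod 15 12 = 3 from by decide,
    show PySem.Int.floordiv 3 3 = 1 from by decide, show PySem.Int.mod 3 3 = 0 from by decide]

theorem gB16 (m : Int) : gB (24 * m + 16) = "G" ++ PySem.Int.toStr 2 ++ "y" ++ "_" ++ PySem.Int.toStr (m + 1) := by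
  rw [gB_elem m 16 (by norm_num) (by norm_num)]
  norm_num [show PySem.Int.floordiv 16 12 = 1 from by decide, show PySem.Int.mod 16 12 = 4 from by decide,
    show PySem.Int.floordiv 4 3 = 1 from by decide, show PySem.Int.mod 4 3 = 1 from by decide]

theorem gB17 (m : Int) : gB (24 * m + 17) = "G" ++ PySem.Int.toStr 2 ++ "z" ++ "_" ++ PySem.Int.toStr (m + 1) := by
  rw [gB_elem m 17 (by norm_num) (by norm_num)]
  norm_num [show PySem.Int.floordiv 17 12 = 1 from by decide, show PySem.Int.mod 17 12 = 5 from by decide,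
    show PySem.Int.floordiv 5 3 = 1 from by decide, show PySem.Int.mod 5 3 = 2 from by decide]

theorem gB18 (m : Int) : gB (24 * m + 18) = "G" ++ PySem.Int.toStr 3 ++ "x" ++ "_" ++ PySem.Int.toStr (m + 1) := by
  rw [gB_elem m 18 (by norm_num) (by norm_num)]
  norm_num [show PySem.Int.floordiv 18 12 = 1 from by decide, show PySem.Int.mod 18 12 = 6 from by decide,
    show PySem.Int.floordiv 6 3 = 2 from by decide, show PySem.Int.mod 6 3 = 0 from by decide]

theorem gB19 (m : Int) : gB (24 * m + 19) = "G" ++ PySem.Int.toStr 3 ++ "y" ++ "_" ++ PySem.Int.toStr (m + 1) := by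
  rw [gB_elem m 19 (by norm_num) (by norm_num)]
  norm_num [show PySem.Int.floordiv 19 12 = 1 from by decide, show PySem.Int.mod 19 12 = 7 from by decide,
    show PySem.Int.floordiv 7 3 = 2 from by decide, show PySem.Int.mod 7 3 = 1 from by decide]

theorem gB20 (m : Int) : gB (24 * m + 20) = "G" ++ PySem.Int.toStr 3 ++ "z" ++ "_" ++ PySem.Int.toStr (m + 1) := by
  rw [gB_elem m 20 (by norm_num) (by norm_num)]
  norm_num [show PySem.Int.floordiv 20 12 = 1 from by decide, show PySem.Int.mod 20 12 = 8 from by decide,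
    show PySem.Int.floordiv 8 3 = 2 from by decide, show PySem.Int.mod 8 3 = 2 from by decide]

theorem gB21 (m : Int) : gB (24 * m + 21) = "G" ++ PySem.Int.toStr 4 ++ "x" ++ "_" ++ PySem.Int.toStr (m + 1) := by
  rw [gB_elem m 21 (by norm_num) (by norm_num)]
  norm_num [show PySem.Int.floordiv 21 12 = 1 from by decide, show PySem.Int.mod 21 12 = 9 from by decide,
    show PySem.Int.floordiv 9 3 = 3 from by decide, show PySem.Int.mod 9 3 = 0 from by decide]

theorem gB22 (m : Int) : gB (24 * m + 22) = "G" ++ PySem.Int.toStr 4 ++ "y" ++ "_" ++ PySem.Int.toStr (m + 1) := by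
  rw [gB_elem m 22 (by norm_num) (by norm_num)]
  norm_num [show PySem.Int.floordiv 22 12 = 1 from by decide, show PySem.Int.mod 22 12 = 10 from by decide,
    show PySem.Int.floordiv 10 3 = 3 from by decide, show PySem.Int.mod 10 3 = 1 from by decide]

theorem gB23 (m : Int) : gB (24 * m + 23) = "G" ++ PySem.Int.toStr 4 ++ "z" ++ "_" ++ PySem.Int.toStr (m + 1) := by
  rw [gB_elem m 23 (by norm_num) (by norm_num)]
  norm_num [show PySem.Int.floordiv 23 12 = 1 from by decide, show PySem.Int.mod 23 12 = 11 from by decide,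
    show PySem.Int.floordiv 11 3 = 3 from by decide, show PySem.Int.mod 11 3 = 2 from by decide]

theorem chunk_eq (m : Int) :
    (PySem.List.pyRange (24 * m) (24 * m + 24) 1).map gB = blockA m := by
  have hr : PySem.List.pyRange (24 * m) (24 * m + 24) 1
      = (List.range 24).map (fun k : Nat => 24 * m + (k : Int)) := by
    have h24 : (24 * m + 24 - 24 * m).toNat = 24 := by omega
    rw [PySem.List.pyRange_one, h24]
  rw [hr]
  have hpr : PySem.List.pyRange 1 (4 + 1) 1 = [1, 2, 3, 4] := by decide
  simp only [List.range_succ, List.range_zero, blockA, hpr]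
  simp only [List.map, List.flatMap, List.nil_append, List.flatten, List.cons_append]
  norm_num only [Nat.cast_ofNat, Nat.cast_zero, Nat.cast_one]
  rw [gB0 m, gB1 m, gB2 m, gB3 m, gB4 m, gB5 m, gB6 m, gB7 m, gB8 m, gB9 m, gB10 m, gB11 m, gB12 m, gB13 m, gB14 m, gB15 m, gB16 m, gB17 m, gB18 m, gB19 m, gB20 m, gB21 m, gB22 m, gB23 m]
  simp [← String.append_assoc]

theorem main_eq (n : Int) :
    (PySem.List.pyRange 0 (24 * n) 1).map gB = (PySem.List.pyRange 0 n 1).flatMap blockA := by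
  by_cases h : n ≤ 0
  · rw [PySem.List.pyRange_one_eq_nil (by omega), PySem.List.pyRange_one_eq_nil (by omega)]
    simp
  · rw [not_le] at h
    obtain ⟨m, rfl⟩ : ∃ m : Nat, n = (m : Int) := ⟨n.toNat, by omega⟩
    clear h
    induction m with
    | zero => simp [PySem.List.pyRange_one_eq_nil]
    | succ p ih =>
      have h1 : ((p + 1 : Nat) : Int) = (p : Int) + 1 := by push_cast; ring
      rw [h1, PySem.List.pyRange_one_succ_right (by positivity),
        show 24 * ((p : Int) + 1) = 24 * (p : Int) + 24 by ring,
        PySem.List.pyRange_one_append 0 (24 * (p : Int)) (24 * (p : Int) + 24) (by positivity) (by omega)]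
      simp only [List.map_append, List.flatMap_append, ih, List.flatMap_cons, List.flatMap_nil, List.append_nil]
      rw [chunk_eq]

-- ===== VERDICT (by name: the statement is the Claim_ definition above) =====
theorem generate_column_names_spec : Claim_equal_generate_column_names := by
  intro n _
  unfold Spec_generate_column_names
  rw [A_as_flatMap, B_as_map, main_eq]
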